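-- pv_equiv track=rewrite | github.com/Reneechang17/Leetcode-Solution | 1933. Check if String Is Decomposable Into Value-Equal Substrings.py | isDecomposable
-- ===== SOURCE A (Python) =====
-- def isDecomposable(s: str) -> bool:
--     i = 0
--     has_two = False
--
--     while i < len(s):
--         j = i
--         while j < len(s) and s[j] == s[i]:
--             j += 1
--
--         length = j - i
--
--         if length % 3 == 1:
--             return False
--         elif length % 3 == 2:
--             if has_two:
--                 return False
--             has_two = True
--
--         i = j
--
--     return has_two
-- ===== SOURCE B (Python) =====
-- def isDecomposable(s: str) -> bool:
--     # Pass 1: build the list of maximal-run lengths (lstrip peels each run).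
--     runs = []
--     rest = s
--     while rest:
--         stripped = rest.lstrip(rest[0])
--         runs.append(len(rest) - len(stripped))
--         rest = stripped
--     # Pass 2: whole-collection predicates.
--     return all(L % 3 != 1 for L in runs) and sum(1 for L in runs if L % 3 == 2) == 1
-- ===== Notes on version B (the rewrite author's own statement) =====
-- stated objective: simpler
-- what changed: B first builds the list of maximal-run lengths by repeatedly peeling the leading run with lstrip, then decides the answer with whole-collection predicates (all runs have length % 3 != 1 and exactly one run has length % 3 == 2), replacing A's interleaved index loop with stateful early returns.
import Mathlib
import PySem

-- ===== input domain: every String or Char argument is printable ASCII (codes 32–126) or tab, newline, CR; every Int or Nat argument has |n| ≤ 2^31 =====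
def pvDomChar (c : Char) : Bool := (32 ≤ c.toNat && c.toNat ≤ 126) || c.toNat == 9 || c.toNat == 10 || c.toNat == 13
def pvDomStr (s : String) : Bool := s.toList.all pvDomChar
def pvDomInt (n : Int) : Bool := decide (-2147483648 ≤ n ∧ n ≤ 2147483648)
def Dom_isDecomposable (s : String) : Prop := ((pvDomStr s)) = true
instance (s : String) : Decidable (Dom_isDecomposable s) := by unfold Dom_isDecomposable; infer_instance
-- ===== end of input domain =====

-- B builds the list of maximal-run lengths first, then checks the %3 conditions with
-- whole-collection predicates, instead of A's interleaved index loop with early returns.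


-- ===== PORT A =====
-- inner `while j < len(s) and s[j] == s[i]` (c is s[i])
def pvFindJ (cs : List Char) (c : Char) (j : Nat) : Nat :=
  if h : j < cs.length then
    if cs[j] == c then pvFindJ cs c (j + 1) else j
  else j
termination_by cs.length - j

theorem pvFindJ_ge (cs : List Char) (c : Char) (j : Nat) : j ≤ pvFindJ cs c j := by
  fun_induction pvFindJ with
  | case1 j h heq ih => omega
  | case2 => omega
  | case3 => omega

theorem pvFindJ_gt (cs : List Char) (i : Nat) (h : i < cs.length) :
    i < pvFindJ cs cs[i] i := by
  rw [pvFindJ]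
  simp only [h, dif_pos, beq_self_eq_true, if_pos]
  have := pvFindJ_ge cs cs[i] (i + 1)
  omega

-- outer `while i < len(s)` with state has_two
def pvALoop (cs : List Char) (i : Nat) (has_two : Bool) : Bool :=
  if h : i < cs.length then
    let j := pvFindJ cs cs[i] i
    let length := j - i
    if length % 3 = 1 then false
    else if length % 3 = 2 then
      if has_two then false else pvALoop cs j true
    else pvALoop cs j has_two
  else has_two
termination_by cs.length - i
decreasing_by all_goals
  · have := pvFindJ_gt cs i h; omega

def isDecomposable (s : String) : Bool := pvALoop s.toList 0 false

-- ===== PORT B =====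
-- `rest.lstrip(rest[0])` = dropWhile equal to the first char; peel runs, record lengths
def pvRuns : List Char → List Nat
  | [] => []
  | c :: t =>
    let stripped := (c :: t).dropWhile (· == c)
    ((c :: t).length - stripped.length) :: pvRuns stripped
termination_by cs => cs.length
decreasing_by
  simp only [List.dropWhile_cons, beq_self_eq_true, if_pos]
  have := List.length_dropWhile_le (· == c) t
  simpa using Nat.lt_succ_of_le this

def isDecomposable_alt (s : String) : Bool :=
  let runs := pvRuns s.toList
  runs.all (fun L => L % 3 != 1) && (runs.countP (fun L => L % 3 == 2) == 1)

-- ===== PRECONDITION & SPEC =====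
def Spec_isDecomposable (s : String) (out : Bool) : Prop := out = isDecomposable_alt s
instance (s : String) (out : Bool) : Decidable (Spec_isDecomposable s out) := by unfold Spec_isDecomposable; infer_instance

-- ===== CLAIM (what is proved, stated in full; the proofs are below) =====
def Claim_equal_isDecomposable : Prop := ∀ (s : String), Dom_isDecomposable s → Spec_isDecomposable s (isDecomposable s)

-- ===== LEMMAS AND PROOFS =====

-- A's inner loop advances by the leading run of cs.drop j matching c
theorem pvFindJ_eq (cs : List Char) (c : Char) (j : Nat) :
    pvFindJ cs c j = j + ((cs.drop j).takeWhile (· == c)).length := by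
  fun_induction pvFindJ with
  | case1 j h heq ih =>
    have hd : cs.drop j = cs[j] :: cs.drop (j + 1) := by
      rw [List.drop_eq_getElem_cons h]
    rw [hd, List.takeWhile_cons, if_pos heq]
    simp only [List.length_cons]
    omega
  | case2 j h heq =>
    have hd : cs.drop j = cs[j] :: cs.drop (j + 1) := by
      rw [List.drop_eq_getElem_cons h]
    rw [hd, List.takeWhile_cons, if_neg (by simpa using heq)]
    simp
  | case3 j h =>
    rw [List.drop_eq_nil_of_le (by omega)]
    simp

theorem pv_dropWhile_eq_drop {α : Type} (p : α → Bool) (l : List α) :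
    l.dropWhile p = l.drop (l.takeWhile p).length := by
  induction l with
  | nil => simp
  | cons a t ih =>
    by_cases hp : p a <;>
      simp [hp, ih]

theorem pv_takeWhile_len_le {α : Type} (p : α → Bool) (l : List α) :
    (l.takeWhile p).length ≤ l.length := by
  induction l with
  | nil => simp
  | cons a t ih =>
    by_cases hp : p a <;> simp [hp]
    omega

-- the stateful check A performs, expressed over the run-length list
def pvChk : List Nat → Bool → Bool
  | [], ht => ht
  | L :: ls, ht =>
    if L % 3 = 1 then false
    else if L % 3 = 2 then (if ht then false else pvChk ls true)
    else pvChk ls ht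

-- one peeling step of B's run builder, phrased at A's loop index
theorem pvRuns_step (cs : List Char) (i : Nat) (h : i < cs.length) :
    pvRuns (cs.drop i) =
      (pvFindJ cs cs[i] i - i) :: pvRuns (cs.drop (pvFindJ cs cs[i] i)) := by
  have hd : cs.drop i = cs[i] :: cs.drop (i + 1) := List.drop_eq_getElem_cons h
  have hj := pvFindJ_eq cs cs[i] i
  have hdw : (cs.drop i).dropWhile (· == cs[i]) = cs.drop (pvFindJ cs cs[i] i) := by
    rw [pv_dropWhile_eq_drop, List.drop_drop, hj, Nat.add_comm]
  have hle : pvFindJ cs cs[i] i ≤ cs.length := by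
    have := pv_takeWhile_len_le (· == cs[i]) (cs.drop i)
    simp only [List.length_drop] at this
    omega
  have hgt : i < pvFindJ cs cs[i] i := pvFindJ_gt cs i h
  conv_lhs => rw [hd, pvRuns]
  simp only [← hd, hdw]
  congr 1
  simp only [List.length_drop]
  omega

-- A's loop equals B's stateful check over the run-length list of the remaining suffix
theorem pvALoop_eq_chk (cs : List Char) (i : Nat) (ht : Bool) :
    pvALoop cs i ht = pvChk (pvRuns (cs.drop i)) ht := by
  fun_induction pvALoop with
  | case1 i ht h j len h1 =>
    rw [pvRuns_step cs i h, pvChk, if_pos h1]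
  | case2 i h j len h1 h2 =>
    rw [pvRuns_step cs i h, pvChk, if_neg h1, if_pos h2, if_pos rfl]
  | case3 i ht h j len h1 h2 h3 ih =>
    rw [pvRuns_step cs i h, pvChk, if_neg h1, if_pos h2, if_neg (by simp [h3]), ih]
  | case4 i ht h j len h1 h2 ih =>
    rw [pvRuns_step cs i h, pvChk, if_neg h1, if_neg h2, ih]
  | case5 i ht h =>
    rw [List.drop_eq_nil_of_le (by omega)]
    simp [pvRuns, pvChk]

theorem pvChk_eq (ls : List Nat) (ht : Bool) :
    pvChk ls ht = (ls.all (fun L => L % 3 != 1) &&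
      ((ls.countP (fun L => L % 3 == 2) + (if ht then 1 else 0)) == 1)) := by
  induction ls generalizing ht with
  | nil => cases ht <;> simp [pvChk]
  | cons L ls ih =>
    rw [pvChk]
    by_cases h1 : L % 3 = 1
    · simp [h1]
    · by_cases h2 : L % 3 = 2
      · rw [if_neg h1, if_pos h2]
        cases ht
        · rw [if_neg (by simp)]
          rw [ih]
          simp [h2, Nat.add_comm]
        · rw [if_pos rfl]
          simp only [List.countP_cons, List.all_cons]
          rw [if_pos (by simp [h2])]
          simp
      · rw [if_neg h1, if_neg h2, ih]
        simp [h2, show (L % 3 != 1) = true by simp [h1]]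

-- ===== VERDICT (by name: the statement is the Claim_ definition above) =====
theorem isDecomposable_spec : Claim_equal_isDecomposable := by
  intro s _
  unfold Spec_isDecomposable isDecomposable isDecomposable_alt
  rw [pvALoop_eq_chk, List.drop_zero, pvChk_eq]
  simp
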